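-- pv_equiv track=rewrite | github.com/dcknuth/aquaq_challange | chal38.py | streak_comfort
-- ===== SOURCE A (Python) =====
-- def streak_comfort(l):
--     value_list = []
--     for i in range(len(l)):
--         max_run = 0
--         this_run = 0
--         for j in range(i+1):
--             for k in range(i, len(l)):
--                 if sum(l[j:k+1]) % len(l[j:k+1]) == 0:
--                     this_run += 1
--                 else:
--                     if this_run > max_run:
--                         max_run = this_run
--                     this_run = 0
--         if this_run > max_run:
--             max_run = this_run
--         value_list.append(max_run)
--     return(sum(value_list))
-- ===== SOURCE B (Python) =====
-- def streak_comfort(l):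
--     n = len(l)
--     # prefix sums: P[m] = sum of first m elements
--     P = [0]
--     s = 0
--     for x in l:
--         s += x
--         P.append(s)
--     # divisibility table computed ONCE: div[j][k] says sum(l[j:k+1]) divisible by its length
--     div = [[j <= k and (P[k + 1] - P[j]) % (k + 1 - j) == 0 for k in range(n)] for j in range(n)]
--     total = 0
--     for i in range(n):
--         max_run = 0
--         this_run = 0
--         for j in range(i + 1):
--             for k in range(i, n):
--                 if div[j][k]:
--                     this_run += 1
--                 else:
--                     max_run = max(max_run, this_run)
--                     this_run = 0
--         total += max(max_run, this_run)
--     return total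
-- ===== Notes on version B (the rewrite author's own statement) =====
-- stated objective: faster
-- what changed: B precomputes prefix sums and a boolean divisibility table once, replacing A's O(n) slice summation inside the triple i/j/k loop with O(1) table lookups, and accumulates the total directly instead of building value_list.
import Mathlib
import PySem

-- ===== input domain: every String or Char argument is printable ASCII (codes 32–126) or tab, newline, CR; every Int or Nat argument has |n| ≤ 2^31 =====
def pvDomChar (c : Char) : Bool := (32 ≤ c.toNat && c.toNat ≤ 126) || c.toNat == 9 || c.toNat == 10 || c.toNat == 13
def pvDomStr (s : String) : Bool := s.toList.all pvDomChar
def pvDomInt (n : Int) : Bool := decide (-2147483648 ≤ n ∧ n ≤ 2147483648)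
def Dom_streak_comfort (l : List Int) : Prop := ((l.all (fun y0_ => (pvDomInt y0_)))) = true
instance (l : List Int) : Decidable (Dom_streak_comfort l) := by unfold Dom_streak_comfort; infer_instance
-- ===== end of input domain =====

-- B replaces A's per-slice summation (recomputed inside a triple loop) by prefix sums and a
-- divisibility table computed once, an asymptotic speed-up; same return value everywhere.

-- ===== PORT A =====
-- inner 'for k' body: the divisibility test re-sums the slice l[j:k+1]
def pvA_inner (l : List Int) (j : Int) (p : Int × Int) (k : Int) : Int × Int :=
  if PySem.Int.mod (PySem.List.slice l (some j) (some (k + 1))).sum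
      ((PySem.List.slice l (some j) (some (k + 1))).length : Int) = 0 then (p.1, p.2 + 1)
  else if p.2 > p.1 then (p.2, 0) else (p.1, 0)

-- per-i double loop 'for j … for k …' carrying (max_run, this_run)
def pvA_fori (l : List Int) (i : Int) : Int × Int :=
  (PySem.List.pyRange 0 (i + 1) 1).foldl (fun p j =>
    (PySem.List.pyRange i (l.length : Int) 1).foldl (pvA_inner l j) p) (0, 0)

def streak_comfort (l : List Int) : Int :=
  ((PySem.List.pyRange 0 (l.length : Int) 1).foldl (fun vl i =>
    vl ++ [(fun p => if p.2 > p.1 then p.2 else p.1) (pvA_fori l i)]) []).sum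

-- ===== PORT B =====
-- prefix sums P (P[m] = sum of the first m elements), built by one running-sum pass
def pvB_P (l : List Int) : List Int :=
  (l.foldl (fun (sp : Int × List Int) x => (sp.1 + x, sp.2 ++ [sp.1 + x])) (0, [0])).2

-- divisibility table: div[j][k] ↔ j ≤ k and (P[k+1]-P[j]) % (k+1-j) == 0
-- (Source B indexes P and div only in range; pyGetD with a default is exact there)
def pvB_div (l : List Int) : List (List Bool) :=
  (PySem.List.pyRange 0 (l.length : Int) 1).map (fun j =>
    (PySem.List.pyRange 0 (l.length : Int) 1).map (fun k =>
      decide (j ≤ k) &&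
        (PySem.Int.mod (PySem.List.pyGetD (pvB_P l) (k + 1) 0 - PySem.List.pyGetD (pvB_P l) j 0)
          (k + 1 - j) == 0)))

def pvB_inner (l : List Int) (j : Int) (p : Int × Int) (k : Int) : Int × Int :=
  if PySem.List.pyGetD (PySem.List.pyGetD (pvB_div l) j []) k false then (p.1, p.2 + 1)
  else (max p.1 p.2, 0)

def pvB_fori (l : List Int) (i : Int) : Int × Int :=
  (PySem.List.pyRange 0 (i + 1) 1).foldl (fun p j =>
    (PySem.List.pyRange i (l.length : Int) 1).foldl (pvB_inner l j) p) (0, 0)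

def streak_comfort_alt (l : List Int) : Int :=
  (PySem.List.pyRange 0 (l.length : Int) 1).foldl (fun total i =>
    total + (fun p => max p.1 p.2) (pvB_fori l i)) 0

-- ===== PRECONDITION & SPEC =====
def Spec_streak_comfort (l : List Int) (out : Int) : Prop := out = streak_comfort_alt l
instance (l : List Int) (out : Int) : Decidable (Spec_streak_comfort l out) := by unfold Spec_streak_comfort; infer_instance

-- ===== CLAIM (what is proved, stated in full; the proofs are below) =====
def Claim_equal_streak_comfort : Prop := ∀ (l : List Int), Dom_streak_comfort l → Spec_streak_comfort l (streak_comfort l)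

-- ===== LEMMAS AND PROOFS =====

-- the running-sum fold builds exactly the list of prefix sums
theorem pvB_P_fold (l : List Int) (s : Int) (acc : List Int) :
    (l.foldl (fun (sp : Int × List Int) x => (sp.1 + x, sp.2 ++ [sp.1 + x])) (s, acc)) =
      (s + l.sum, acc ++ (List.range l.length).map (fun m => s + (l.take (m + 1)).sum)) := by
  induction l generalizing s acc with
  | nil => simp
  | cons x t ih =>
    simp only [List.foldl_cons]
    rw [ih]
    refine Prod.ext (by simp [add_assoc]) ?_
    simp [List.range_succ_eq_map, List.map_map, Function.comp, add_assoc, List.append_assoc]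

theorem pvB_P_getD (l : List Int) (m : Nat) (hm : m ≤ l.length) :
    (pvB_P l).getD m 0 = (l.take m).sum := by
  unfold pvB_P
  rw [pvB_P_fold]
  cases m with
  | zero => simp
  | succ m =>
    have hlt : m < l.length := by omega
    simp only [List.singleton_append, List.getD_cons_succ]
    rw [PySem.List.getD_map_range _ _ _ _ hlt]
    simp

-- the table entry equals A's divisibility test on the slice l[j:k+1]
theorem pvB_entry (l : List Int) (j k : Int) (h0 : 0 ≤ j) (hjk : j ≤ k)
    (hk : k < (l.length : Int)) :
    (decide (j ≤ k) &&
      (PySem.Int.mod (PySem.List.pyGetD (pvB_P l) (k + 1) 0 - PySem.List.pyGetD (pvB_P l) j 0)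
        (k + 1 - j) == 0)) =
    decide (PySem.Int.mod (PySem.List.slice l (some j) (some (k + 1))).sum
      ((PySem.List.slice l (some j) (some (k + 1))).length : Int) = 0) := by
  have hPk : PySem.List.pyGetD (pvB_P l) (k + 1) 0 = (l.take (k + 1).toNat).sum := by
    rw [PySem.List.pyGetD_of_nonneg _ _ (by omega), pvB_P_getD l _ (by omega)]
  have hPj : PySem.List.pyGetD (pvB_P l) j 0 = (l.take j.toNat).sum := by
    rw [PySem.List.pyGetD_of_nonneg _ _ h0, pvB_P_getD l _ (by omega)]
  have hsl : PySem.List.slice l (some j) (some (k + 1)) =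
      (l.drop j.toNat).take ((k + 1).toNat - j.toNat) :=
    PySem.List.slice_toNat l h0 (by omega)
  have htake : l.take (k + 1).toNat =
      l.take j.toNat ++ (l.drop j.toNat).take ((k + 1).toNat - j.toNat) := by
    rw [← List.take_add]
    congr 1
    omega
  have hsum : (PySem.List.slice l (some j) (some (k + 1))).sum =
      PySem.List.pyGetD (pvB_P l) (k + 1) 0 - PySem.List.pyGetD (pvB_P l) j 0 := by
    rw [hPk, hPj, hsl, htake]
    simp
  have hlen : ((PySem.List.slice l (some j) (some (k + 1))).length : Int) = k + 1 - j := by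
    rw [hsl]
    simp only [List.length_take, List.length_drop]
    omega
  rw [hsum, hlen]
  simp only [hjk, decide_true, Bool.true_and]
  rw [Bool.eq_iff_iff]
  simp

theorem pv_ite_max (a b : Int) : (if b > a then b else a) = max a b := by
  by_cases h : b > a <;> simp [h] <;> omega

-- one step of the k-loop is identical in both ports when 0 ≤ j ≤ k < len l
theorem pv_inner_eq (l : List Int) (j k : Int) (p : Int × Int) (h0 : 0 ≤ j) (hjk : j ≤ k)
    (hk : k < (l.length : Int)) : pvA_inner l j p k = pvB_inner l j p k := by
  have hj' : j = ((j.toNat : Nat) : Int) := by omega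
  have hk' : k = ((k.toNat : Nat) : Int) := by omega
  have hdv : PySem.List.pyGetD (PySem.List.pyGetD (pvB_div l) j []) k false =
      (decide (j ≤ k) &&
        (PySem.Int.mod (PySem.List.pyGetD (pvB_P l) (k + 1) 0 - PySem.List.pyGetD (pvB_P l) j 0)
          (k + 1 - j) == 0)) := by
    unfold pvB_div
    rw [hj', PySem.List.pyGetD_map_pyRange _ _ _ _ (by omega), ← hj']
    rw [hk', PySem.List.pyGetD_map_pyRange _ _ _ _ (by omega), ← hk']
  unfold pvA_inner pvB_inner
  rw [hdv, pvB_entry l j k h0 hjk hk]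
  simp only [decide_eq_true_eq]
  split_ifs with hc h
  · rfl
  · exact Prod.ext (by omega) rfl
  · exact Prod.ext (by omega) rfl

theorem pv_fori_eq (l : List Int) (i : Int) (_h0 : 0 ≤ i) (_hi : i < (l.length : Int)) :
    pvA_fori l i = pvB_fori l i := by
  unfold pvA_fori pvB_fori
  apply PySem.List.foldl_congr_mem
  intro p j hj
  obtain ⟨hj0, hj1⟩ := PySem.List.mem_pyRange_one.mp hj
  apply PySem.List.foldl_congr_mem
  intro q k hk
  obtain ⟨hk0, hk1⟩ := PySem.List.mem_pyRange_one.mp hk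
  exact pv_inner_eq l j k q hj0 (by omega) hk1

-- ===== VERDICT (by name: the statement is the Claim_ definition above) =====
theorem streak_comfort_spec : Claim_equal_streak_comfort := by
  intro l _
  unfold Spec_streak_comfort streak_comfort streak_comfort_alt
  rw [PySem.List.foldl_append_singleton_eq_map, PySem.List.foldl_add]
  simp only [List.nil_append, zero_add]
  congr 1
  apply List.map_congr_left
  intro i hi
  obtain ⟨hi0, hi1⟩ := PySem.List.mem_pyRange_one.mp hi
  rw [pv_fori_eq l i hi0 hi1]
  exact pv_ite_max _ _
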